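-- pv_equiv track=rewrite | github.com/evfinkn/MSHS-projects | Programs/MultiplicationV1.py | FindNums
-- ===== SOURCE A (Python) =====
-- def FindNums(string):
--     if (type(string) == type("string")):
--         string = list(string)
--     for y in range(len(string)):
--         if (string[y] == "^"):
--             string.pop(y)
--             string.pop(y)
--             string = FindNums(string)
--             break
--         elif (not string[y].isdigit()):
--             string.pop(y)
--             string = FindNums(string)
--             break
--     return string
-- ===== SOURCE B (Python) =====
-- def FindNums(string):
--     if type(string) == type("string"):
--         string = list(string)
--     out = []
--     skip = False
--     for ch in string:
--         if skip:
--             skip = False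
--         elif ch == "^":
--             skip = True
--         elif ch.isdigit():
--             out.append(ch)
--     return out
-- ===== Notes on version B (the rewrite author's own statement) =====
-- stated objective: faster
-- what changed: Replaced A's restart-from-scratch recursion (find first bad char, pop it, recurse on the whole list) with a single left-to-right pass carrying a skip flag that drops the character after each '^' and keeps digits.
-- outside the precondition, e.g. on FindNums('^'): A raises IndexError, B returns []
import Mathlib
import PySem

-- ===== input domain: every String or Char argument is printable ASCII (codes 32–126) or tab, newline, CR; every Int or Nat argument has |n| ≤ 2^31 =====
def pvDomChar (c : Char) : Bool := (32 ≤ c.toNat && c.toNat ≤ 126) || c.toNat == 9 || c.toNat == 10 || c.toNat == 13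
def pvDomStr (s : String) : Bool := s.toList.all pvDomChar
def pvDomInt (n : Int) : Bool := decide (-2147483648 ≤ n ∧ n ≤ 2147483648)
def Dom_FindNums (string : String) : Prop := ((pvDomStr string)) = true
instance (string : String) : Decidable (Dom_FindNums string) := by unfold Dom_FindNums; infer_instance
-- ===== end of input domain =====

-- B replaces A's restart-from-scratch recursion (pop first bad char, recurse on the whole list) with one
-- left-to-right pass carrying a skip flag; same return value on all of Pre_ (A raises elsewhere).

-- ===== PORT A =====
-- list(string): Python's list of 1-char strings
def pvToL (string : String) : List String := string.toList.map (fun c => String.ofList [c])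

-- string.pop(y); Python raises IndexError on the 'none' branch (excluded by Pre_)
def pvPop (l : List String) (y : Nat) : List String :=
  match PySem.List.pop? l (y : Int) with
  | some p => p.2
  | none => l

-- the 'for y in range(len(string))' scan up to the first break: index of the first
-- element that is '^' or not a digit (the obvious structural recursion for that loop)
def pvFirstBad : List String → Nat → Option Nat
  | [], _ => none
  | x :: rest, y =>
    if x == "^" || !(PySem.Str.strIsdigit x) then some y else pvFirstBad rest (y + 1)

-- A's recursion; each round removes at least one element, so fuel = length is enough
-- (the fuel argument only makes the same computation total, it never changes a result)
def pvGoA : Nat → List String → List String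
  | 0, l => l
  | fuel + 1, l =>
    match pvFirstBad l 0 with
    | none => l
    | some y =>
      if (l[y]?).getD "" == "^" then
        pvGoA fuel (pvPop (pvPop l y) y)
      else
        pvGoA fuel (pvPop l y)

def FindNums (string : String) : List String :=
  pvGoA (pvToL string).length (pvToL string)

-- ===== PORT B =====
def pvStepB (st : List String × Bool) (ch : String) : List String × Bool :=
  if st.2 then (st.1, false)
  else if ch == "^" then (st.1, true)
  else if PySem.Str.strIsdigit ch then (st.1 ++ [ch], false)
  else (st.1, false)

def FindNums_alt (string : String) : List String :=
  ((pvToL string).foldl pvStepB ([], false)).1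

-- ===== PRECONDITION & SPEC =====
-- Pre_ excludes exactly the inputs on which Python A raises IndexError: strings whose
-- trailing run of '^' has odd length (the pop after the final '^' is out of range).
def Pre_FindNums (string : String) : Prop :=
  (string.toList.reverse.takeWhile (fun c => c == '^')).length % 2 = 0
instance (string : String) : Decidable (Pre_FindNums string) := by
  unfold Pre_FindNums; infer_instance

def pvWitness_FindNums : String := "1^23"

def Spec_FindNums (string : String) (out : List String) : Prop := out = FindNums_alt string
instance (string : String) (out : List String) : Decidable (Spec_FindNums string out) := by
  unfold Spec_FindNums; infer_instance

-- ===== CLAIM (what is proved, stated in full; the proofs are below) =====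
def Claim_equal_FindNums : Prop :=
  ∀ (string : String), Dom_FindNums string → Pre_FindNums string →
    Spec_FindNums string (FindNums string)

-- ===== LEMMAS AND PROOFS =====

-- B's fold with the accumulator pulled out
def pvS (l : List String) (b : Bool) : List String := (l.foldl pvStepB ([], b)).1

theorem pvStepB_acc (out : List String) (b : Bool) (ch : String) :
    pvStepB (out, b) ch = (out ++ (pvStepB ([], b) ch).1, (pvStepB ([], b) ch).2) := by
  simp only [pvStepB]
  split_ifs <;> simp

theorem foldl_stepB_acc (l : List String) (out : List String) (b : Bool) :
    l.foldl pvStepB (out, b) =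
      (out ++ (l.foldl pvStepB ([], b)).1, (l.foldl pvStepB ([], b)).2) := by
  induction l generalizing out b with
  | nil => simp
  | cons c l ih =>
    simp only [List.foldl_cons]
    rw [pvStepB_acc]
    rcases hs : pvStepB ([], b) c with ⟨d, b'⟩
    rw [ih, ih d b']
    simp

theorem pvS_nil (b : Bool) : pvS [] b = [] := by simp [pvS]

theorem pvS_cons_true (c : String) (l : List String) : pvS (c :: l) true = pvS l false := by
  simp [pvS, pvStepB]

theorem pvS_cons_false (c : String) (l : List String) :
    pvS (c :: l) false =
      if c == "^" then pvS l true
      else if PySem.Str.strIsdigit c then c :: pvS l false else pvS l false := by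
  by_cases h1 : (c == "^") = true
  · simp [pvS, pvStepB, h1]
  · by_cases h2 : PySem.Str.strIsdigit c = true
    · have h2' : PySem.Chars.strIsdigit c.toList = true := by simpa using h2
      have hacc := foldl_stepB_acc l [c] false
      simp [pvS, pvStepB, h1, h2', hacc]
    · have h2' : ¬ PySem.Chars.strIsdigit c.toList = true := by simpa using h2
      simp [pvS, pvStepB, h1, h2']

theorem pvS_digit_prefix (pre l : List String)
    (h : ∀ x ∈ pre, PySem.Str.strIsdigit x = true) :
    pvS (pre ++ l) false = pre ++ pvS l false := by
  induction pre with
  | nil => simp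
  | cons d pre ih =>
    have hd : PySem.Str.strIsdigit d = true := h d (by simp)
    have hne : (d == "^") = false := by
      by_cases hdq : d = "^"
      · subst hdq; exact absurd hd (by decide)
      · simp [hdq]
    rw [List.cons_append, pvS_cons_false, hne]
    simp only [hd, if_true]
    rw [ih (fun x hx => h x (by simp [hx]))]
    rfl

theorem pvS_all_digits (l : List String) (h : ∀ x ∈ l, PySem.Str.strIsdigit x = true) :
    pvS l false = l := by
  have := pvS_digit_prefix l [] h
  simpa [pvS] using this

theorem pvFirstBad_none (l : List String) (y : Nat) (h : pvFirstBad l y = none) :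
    ∀ x ∈ l, PySem.Str.strIsdigit x = true := by
  induction l generalizing y with
  | nil => intro x hx; cases hx
  | cons c rest ih =>
    rw [pvFirstBad] at h
    by_cases hb : (c == "^" || !(PySem.Str.strIsdigit c)) = true
    · rw [if_pos hb] at h; cases h
    · rw [if_neg hb] at h
      intro x hx
      simp only [Bool.or_eq_true, Bool.not_eq_eq_eq_not, Bool.not_true, not_or] at hb
      rcases List.mem_cons.mp hx with rfl | hx'
      · simpa using hb.2
      · exact ih (y + 1) h x hx'

theorem pvFirstBad_some (l : List String) (y z : Nat) (h : pvFirstBad l y = some z) :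
    ∃ pre b suf, l = pre ++ b :: suf ∧ pre.length + y = z ∧
      (∀ x ∈ pre, PySem.Str.strIsdigit x = true) ∧
      (b == "^" || !(PySem.Str.strIsdigit b)) = true := by
  induction l generalizing y with
  | nil => cases h
  | cons c rest ih =>
    rw [pvFirstBad] at h
    by_cases hb : (c == "^" || !(PySem.Str.strIsdigit c)) = true
    · rw [if_pos hb] at h
      cases h
      exact ⟨[], c, rest, rfl, by simp, fun x hx => absurd hx (List.not_mem_nil), hb⟩
    · rw [if_neg hb] at h
      obtain ⟨pre, b, suf, hl, hlen, hpre, hbad⟩ := ih (y + 1) h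
      refine ⟨c :: pre, b, suf, by simp [hl], by simp only [List.length_cons]; omega, ?_, hbad⟩
      intro x hx
      simp only [Bool.or_eq_true, Bool.not_eq_eq_eq_not, Bool.not_true, not_or] at hb
      rcases List.mem_cons.mp hx with rfl | hx'
      · simpa using hb.2
      · exact hpre x hx'

theorem pvPop_mid (pre : List String) (b : String) (suf : List String) :
    pvPop (pre ++ b :: suf) pre.length = pre ++ suf := by
  have hlt : pre.length < (pre ++ b :: suf).length := by simp
  rw [pvPop, PySem.List.pop?_natCast _ _ hlt]
  simp [List.eraseIdx_append_of_length_le (le_refl _)]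

theorem pvPop_oob (l : List String) (y : Nat) (h : l.length ≤ y) : pvPop l y = l := by
  have hp : PySem.List.pop? l (y : Int) = none := by
    simp [PySem.List.pop?, PySem.List.pyIdx?]
    omega
  rw [pvPop, hp]

theorem pvGet_mid (pre : List String) (b : String) (suf : List String) :
    ((pre ++ b :: suf)[pre.length]?).getD "" = b := by
  rw [List.getElem?_append_right (le_refl _)]
  simp

theorem pvGoA_eq_pvS (fuel : Nat) (l : List String) (hfuel : l.length ≤ fuel) :
    pvGoA fuel l = pvS l false := by
  induction fuel generalizing l with
  | zero =>
    have : l = [] := List.eq_nil_of_length_eq_zero (Nat.le_zero.mp hfuel)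
    subst this
    simp [pvGoA, pvS_nil]
  | succ fuel ih =>
    rw [pvGoA]
    split
    case h_1 hfb =>
      exact (pvS_all_digits l (pvFirstBad_none l 0 hfb)).symm
    case h_2 y hfb =>
      obtain ⟨pre, b, suf, hl, hlen, hpre, hbad⟩ := pvFirstBad_some l 0 y hfb
      rw [Nat.add_zero] at hlen
      subst hl hlen
      rw [pvGet_mid]
      by_cases hcar : (b == "^") = true
      · rw [if_pos hcar]
        have hb : b = "^" := eq_of_beq hcar
        subst hb
        rw [pvPop_mid]
        cases suf with
        | nil =>
          rw [pvPop_oob _ _ (by simp), List.append_nil]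
          rw [ih pre (by simp at hfuel; omega)]
          rw [pvS_all_digits pre hpre, pvS_digit_prefix _ _ hpre, pvS_cons_false]
          simp [pvS_nil]
        | cons x suf' =>
          rw [pvPop_mid]
          rw [ih (pre ++ suf') (by simp at hfuel ⊢; omega)]
          rw [pvS_digit_prefix _ _ hpre, pvS_digit_prefix _ _ hpre, pvS_cons_false]
          simp [pvS_cons_true]
      · rw [if_neg hcar]
        have hnd : PySem.Str.strIsdigit b = false := by
          rcases Bool.or_eq_true_iff.mp hbad with h | h
          · exact absurd h hcar
          · simpa using h
        rw [pvPop_mid]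
        rw [ih (pre ++ suf) (by simp at hfuel ⊢; omega)]
        rw [pvS_digit_prefix _ _ hpre, pvS_digit_prefix _ _ hpre, pvS_cons_false]
        have hnd' : PySem.Chars.strIsdigit b.toList = false := by simpa using hnd
        simp [hcar, hnd']

-- ===== VERDICT (by name: the statement is the Claim_ definition above) =====
theorem FindNums_spec : Claim_equal_FindNums := by
  intro string _ _
  unfold Spec_FindNums FindNums FindNums_alt
  rw [pvGoA_eq_pvS _ _ (le_refl _)]
  rfl
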